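-- pv_equiv track=rewrite | github.com/meet-eu-21/Team-SB3 | Get_URL.py | terminer
-- ===== SOURCE A (Python) =====
-- def terminer(liste):
--     liste_repons = ['yes']
--     for i in liste:
--         if i[-12:] == '.RAWobserved':
--             liste_repons.append('yes')
--         else:
--             liste_repons.append('no')
--             break
--     if len(set(liste_repons))==1:
--         repons = 'stop'
--     else:
--         repons = 'continuer'
--     if len(liste)==1:
--         repons = 'continuer'
--     return repons
-- ===== SOURCE B (Python) =====
-- def terminer(liste):
--     if len(liste) != 1 and all(i[-12:] == '.RAWobserved' for i in liste):
--         return 'stop'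
--     return 'continuer'
-- ===== Notes on version B (the rewrite author's own statement) =====
-- stated objective: simpler
-- what changed: Replaces the flag-list accumulator plus set-cardinality uniformity test (and the post-hoc len==1 override) with one direct boolean: len(liste) != 1 and all items end in '.RAWobserved' (via the same [-12:] slice).
import Mathlib
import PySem

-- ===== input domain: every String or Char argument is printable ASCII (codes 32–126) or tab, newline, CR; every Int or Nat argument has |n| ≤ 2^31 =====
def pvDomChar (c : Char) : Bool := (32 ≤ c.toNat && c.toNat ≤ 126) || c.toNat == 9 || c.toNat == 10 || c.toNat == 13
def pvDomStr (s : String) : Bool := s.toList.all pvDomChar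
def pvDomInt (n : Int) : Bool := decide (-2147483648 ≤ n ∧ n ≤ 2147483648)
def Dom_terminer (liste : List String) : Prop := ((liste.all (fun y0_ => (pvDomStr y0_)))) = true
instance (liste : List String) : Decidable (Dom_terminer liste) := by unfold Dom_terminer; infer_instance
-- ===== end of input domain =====

-- B replaces the flag-list + set-cardinality idiom with one direct boolean test (simpler).

-- ===== PORT A =====
-- the for-loop with break, building liste_repons's tail
def terminerLoop (liste : List String) : List String :=
  match liste with
  | [] => []
  | i :: rest =>
    if PySem.Str.slice i (some (-12)) none == ".RAWobserved" then
      "yes" :: terminerLoop rest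
    else
      ["no"]

def terminer (liste : List String) : String :=
  let liste_repons := "yes" :: terminerLoop liste
  let repons := if (PySem.Set.ofList liste_repons).length == 1 then "stop" else "continuer"
  if liste.length == 1 then "continuer" else repons

-- ===== PORT B =====
def terminer_alt (liste : List String) : String :=
  if liste.length != 1 && liste.all (fun i => PySem.Str.slice i (some (-12)) none == ".RAWobserved") then
    "stop"
  else
    "continuer"

-- ===== PRECONDITION & SPEC =====
def Spec_terminer (liste : List String) (out : String) : Prop := out = terminer_alt liste
instance (liste : List String) (out : String) : Decidable (Spec_terminer liste out) := by unfold Spec_terminer; infer_instance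

-- ===== CLAIM (what is proved, stated in full; the proofs are below) =====
def Claim_equal_terminer : Prop := ∀ (liste : List String), Dom_terminer liste → Spec_terminer liste (terminer liste)

-- ===== LEMMAS AND PROOFS =====

-- when every item matches, the loop yields only "yes"
theorem terminerLoop_all_yes (l : List String)
    (h : l.all (fun i => PySem.Str.slice i (some (-12)) none == ".RAWobserved") = true) :
    terminerLoop l = List.replicate l.length "yes" := by
  induction l with
  | nil => rfl
  | cons i rest ih =>
    simp only [List.all_cons, Bool.and_eq_true] at h
    simp [terminerLoop, h.1, ih h.2, List.replicate_succ]

theorem setOfList_yes_replicate (n : Nat) :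
    PySem.Set.ofList ("yes" :: List.replicate n "yes") = ["yes"] := by
  have step : ∀ m, List.foldl PySem.Set.add ["yes"] (List.replicate m "yes") = ["yes"] := by
    intro m
    induction m with
    | zero => rfl
    | succ k ih => simpa [List.replicate_succ, PySem.Set.add] using ih
  simpa [PySem.Set.ofList_eq_foldl, PySem.Set.add] using step n

-- when some item fails, the loop contains "no"
theorem no_mem_terminerLoop (l : List String)
    (h : l.all (fun i => PySem.Str.slice i (some (-12)) none == ".RAWobserved") = false) :
    "no" ∈ terminerLoop l := by
  induction l with
  | nil => simp at h
  | cons i rest ih =>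
    simp only [List.all_cons, Bool.and_eq_false_iff] at h
    by_cases hi : (PySem.Str.slice i (some (-12)) none == ".RAWobserved") = true
    · have hr : rest.all (fun i => PySem.Str.slice i (some (-12)) none == ".RAWobserved") = false := by
        rcases h with h | h
        · exact absurd hi (by simp [h])
        · exact h
      simp [terminerLoop, hi, ih hr]
    · simp [terminerLoop, Bool.eq_false_iff.mpr hi]

theorem two_mem_nodup_length_ne_one {α : Type} (s : List α) (a b : α)
    (hn : s.Nodup) (ha : a ∈ s) (hb : b ∈ s) (hab : a ≠ b) : s.length ≠ 1 := by
  intro hlen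
  rcases s with _ | ⟨x, t⟩
  · simp at ha
  · have ht : t = [] := by simpa using hlen
    subst ht
    simp at ha hb
    exact hab (ha.trans hb.symm)

-- ===== VERDICT (by name: the statement is the Claim_ definition above) =====
theorem terminer_spec : Claim_equal_terminer := by
  intro liste _
  unfold Spec_terminer terminer terminer_alt
  by_cases hlen : liste.length = 1
  · simp [hlen]
  · have hlen' : (liste.length != 1) = true := by simp [hlen]
    by_cases hall : liste.all (fun i => PySem.Str.slice i (some (-12)) none == ".RAWobserved") = true
    · have := terminerLoop_all_yes liste hall
      simp [this, setOfList_yes_replicate, hlen, hlen', hall]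
    · have hall' := Bool.eq_false_iff.mpr hall
      have hno : "no" ∈ terminerLoop liste := no_mem_terminerLoop liste hall'
      have hyes : ("yes" : String) ∈ PySem.Set.ofList ("yes" :: terminerLoop liste) := by
        simp [PySem.Set.mem_ofList]
      have hno' : ("no" : String) ∈ PySem.Set.ofList ("yes" :: terminerLoop liste) := by
        simp [PySem.Set.mem_ofList, hno]
      have hnd : (PySem.Set.ofList ("yes" :: terminerLoop liste)).Nodup :=
        PySem.Set.nodup_ofList _
      have hne := two_mem_nodup_length_ne_one _ _ _ hnd hyes hno' (by decide)
      simp [hlen, hlen', hall', hne]
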